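-- pv_equiv track=rewrite | github.com/NIAID-Data-Ecosystem/nde-crawlers | bv_brc/files/bv_brc.py | _build_species_list
-- ===== SOURCE A (Python) =====
-- def _build_species_list(hosts: set[tuple[str, str]]) -> list[dict[str, str]]:
--     result = []
--     seen = set()
--     for host_name, host_sci in sorted(hosts):
--         if host_name not in seen:
--             result.append({"name": host_name})
--             seen.add(host_name)
--     return result
-- ===== SOURCE B (Python) =====
-- def _insert_unique(name: str, lst: list[str]) -> list[str]:
--     """Insert name into a strictly increasing list, keeping it strictly increasing."""
--     if not lst or name < lst[0]:
--         return [name] + lst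
--     if name == lst[0]:
--         return lst
--     return [lst[0]] + _insert_unique(name, lst[1:])
--
--
-- def _build_species_list(hosts: set[tuple[str, str]]) -> list[dict[str, str]]:
--     ordered: list[str] = []
--     for host_name, _host_sci in hosts:
--         ordered = _insert_unique(host_name, ordered)
--     return [{"name": name} for name in ordered]
-- ===== Notes on version B (the rewrite author's own statement) =====
-- stated objective: alternative
-- what changed: B never calls sorted() and keeps no seen-set: it makes one pass over the input, inserting each name into a strictly increasing duplicate-free accumulator (an insertion sort that drops duplicates at the insertion point), then wraps the accumulator in dicts.
import Mathlib
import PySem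

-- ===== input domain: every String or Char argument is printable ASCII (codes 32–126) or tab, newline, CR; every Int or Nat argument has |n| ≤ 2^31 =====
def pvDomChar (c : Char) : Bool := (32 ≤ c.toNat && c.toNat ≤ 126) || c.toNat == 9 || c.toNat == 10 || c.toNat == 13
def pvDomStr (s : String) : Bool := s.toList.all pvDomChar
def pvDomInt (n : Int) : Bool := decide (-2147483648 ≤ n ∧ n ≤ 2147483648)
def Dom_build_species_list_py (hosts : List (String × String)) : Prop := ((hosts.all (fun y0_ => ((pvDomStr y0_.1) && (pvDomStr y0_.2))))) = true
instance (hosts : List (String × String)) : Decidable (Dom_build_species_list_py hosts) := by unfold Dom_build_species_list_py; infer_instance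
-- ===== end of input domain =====

-- B replaces A's sort-all-pairs-then-scan-with-a-seen-set by a single pass that inserts each
-- name into a strictly increasing duplicate-free accumulator (insertion sort skipping duplicates).


-- ===== PORT A =====
-- result = []; seen = set(); for host_name, host_sci in sorted(hosts): if host_name not in seen: append, add
def build_species_list_py (hosts : List (String × String)) : List (List (String × String)) :=
  ((PySem.List.sorted2 hosts Prod.fst Prod.snd).foldl
    (fun (st : List (List (String × String)) × PySem.Set String) hp =>
      if !(PySem.Set.contains st.2 hp.1) then
        (st.1 ++ [[("name", hp.1)]], PySem.Set.add st.2 hp.1)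
      else st)
    ([], PySem.Set.empty)).1

-- ===== PORT B =====
-- _insert_unique: insert name into a strictly increasing list, keeping it strictly increasing
def insertUnique (name : String) : List String → List String
  | [] => [name]
  | x :: t =>
    if name < x then name :: x :: t
    else if name = x then x :: t
    else x :: insertUnique name t

-- ordered = []; for host_name, _ in hosts: ordered = _insert_unique(host_name, ordered); wrap
def build_species_list_py_alt (hosts : List (String × String)) : List (List (String × String)) :=
  (hosts.foldl (fun ordered p => insertUnique p.1 ordered) []).map (fun n => [("name", n)])

-- ===== PRECONDITION & SPEC =====
def Spec_build_species_list_py (hosts : List (String × String)) (out : List (List (String × String))) : Prop := out = build_species_list_py_alt hosts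
instance (hosts : List (String × String)) (out : List (List (String × String))) : Decidable (Spec_build_species_list_py hosts out) := by unfold Spec_build_species_list_py; infer_instance

-- ===== CLAIM (what is proved, stated in full; the proofs are below) =====
def Claim_equal_build_species_list_py : Prop := ∀ (hosts : List (String × String)), Dom_build_species_list_py hosts → Spec_build_species_list_py hosts (build_species_list_py hosts)

-- ===== LEMMAS AND PROOFS =====

-- the names A's loop keeps, given the names already seen (seen grows as Set.add does on a fresh name)
def pvKeep (seen : List String) : List String → List String
  | [] => []
  | n :: t => if seen.contains n then pvKeep seen t else n :: pvKeep (seen ++ [n]) t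

theorem mem_pvKeep (m : String) : ∀ (l : List String) (seen : List String),
    m ∈ pvKeep seen l ↔ m ∈ l ∧ m ∉ seen := by
  intro l
  induction l with
  | nil => intro seen; simp [pvKeep]
  | cons n t ih =>
    intro seen
    by_cases h : n ∈ seen
    · have hc : seen.contains n = true := by simpa using h
      simp only [pvKeep, hc, if_pos]
      rw [ih]
      constructor
      · rintro ⟨hm, hns⟩; exact ⟨List.mem_cons_of_mem _ hm, hns⟩
      · rintro ⟨hm, hns⟩
        rcases List.mem_cons.mp hm with rfl | hm
        · exact absurd h hns
        · exact ⟨hm, hns⟩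
    · have hc : seen.contains n = false := by simpa using h
      simp only [pvKeep, hc, Bool.false_eq_true, if_false, List.mem_cons]
      rw [ih]
      constructor
      · rintro (rfl | ⟨hm, hns⟩)
        · exact ⟨Or.inl rfl, h⟩
        · refine ⟨Or.inr hm, fun hs => hns ?_⟩
          exact List.mem_append_left _ hs
      · rintro ⟨rfl | hm, hns⟩
        · exact Or.inl rfl
        · by_cases hmn : m = n
          · exact Or.inl hmn
          · refine Or.inr ⟨hm, fun hs => ?_⟩
            rcases List.mem_append.mp hs with hs | hs
            · exact hns hs
            · exact hmn (by simpa using hs)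

theorem pvKeep_pairwise_lt : ∀ (l : List String), l.Pairwise (· ≤ ·) →
    ∀ (seen : List String), (pvKeep seen l).Pairwise (· < ·) := by
  intro l
  induction l with
  | nil => intro _ seen; simp [pvKeep]
  | cons n t ih =>
    intro hp seen
    rcases List.pairwise_cons.mp hp with ⟨hle, hpt⟩
    by_cases h : seen.contains n = true
    · simp only [pvKeep, h, if_true]
      exact ih hpt seen
    · have h' : seen.contains n = false := by simpa using h
      simp only [pvKeep, h', Bool.false_eq_true, if_false]
      refine List.pairwise_cons.mpr ⟨?_, ih hpt _⟩
      intro m hm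
      rcases (mem_pvKeep m t _).mp hm with ⟨hmt, hns⟩
      have hne : m ≠ n := fun he => hns (by simp [he])
      exact lt_of_le_of_ne (hle m hmt) (Ne.symm hne)

-- A's loop, peeled off as pvKeep over the name column
theorem foldA (wrap : String → List (String × String)) :
    ∀ (l : List (String × String)) (acc : List (List (String × String))) (seen : List String),
    (l.foldl
      (fun (st : List (List (String × String)) × PySem.Set String) hp =>
        if !(PySem.Set.contains st.2 hp.1) then
          (st.1 ++ [wrap hp.1], PySem.Set.add st.2 hp.1)
        else st)
      (acc, seen)).1 = acc ++ (pvKeep seen (l.map Prod.fst)).map wrap := by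
  intro l
  induction l with
  | nil => intro acc seen; simp [pvKeep]
  | cons p t ih =>
    intro acc seen
    by_cases h : PySem.Set.contains seen p.1 = true
    · have hc : List.contains seen p.1 = true := h
      simp only [List.foldl_cons, h, Bool.not_true, Bool.false_eq_true, if_false,
        List.map_cons, pvKeep, hc, if_pos]
      exact ih acc seen
    · have h' : PySem.Set.contains seen p.1 = false := by simpa using h
      have hc : List.contains seen p.1 = false := h'
      have hadd : PySem.Set.add seen p.1 = seen ++ [p.1] := by
        simp only [PySem.Set.add, PySem.Set.contains, hc, Bool.false_eq_true, if_false]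
      simp only [List.foldl_cons, h', Bool.not_false, if_pos, List.map_cons, pvKeep, hc,
        Bool.false_eq_true, if_false, List.map_cons, hadd]
      rw [ih]
      simp

-- insertBy with a before-test deciding R keeps R-pairwise lists R-pairwise
theorem insertBy_pairwise {α : Type} (before : α → α → Bool) (R : α → α → Prop)
    (h1 : ∀ a b, before a b = true → R a b) (h2 : ∀ a b, before a b = false → R b a)
    (htr : ∀ {a b c}, R a b → R b c → R a c) (x : α) :
    ∀ (l : List α), l.Pairwise R → (PySem.List.insertBy before x l).Pairwise R := by
  intro l
  induction l with
  | nil => intro _; simp [PySem.List.insertBy]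
  | cons y ys ih =>
    intro hp
    rcases List.pairwise_cons.mp hp with ⟨hy, hys⟩
    by_cases hb : before x y = true
    · simp only [PySem.List.insertBy, hb, if_pos]
      refine List.pairwise_cons.mpr ⟨?_, hp⟩
      intro m hm
      rcases List.mem_cons.mp hm with rfl | hm
      · exact h1 _ _ hb
      · exact htr (h1 _ _ hb) (hy m hm)
    · have hb' : before x y = false := by simpa using hb
      simp only [PySem.List.insertBy, hb', Bool.false_eq_true, if_false]
      refine List.pairwise_cons.mpr ⟨?_, ih hys⟩
      intro m hm
      rcases (PySem.List.mem_insertBy before x m ys).mp hm with rfl | hm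
      · exact h2 _ _ hb'
      · exact hy m hm

theorem sorted2_fst_pairwise (hosts : List (String × String)) :
    (PySem.List.sorted2 hosts Prod.fst Prod.snd).Pairwise
      (fun a b => a.1 ≤ b.1) := by
  unfold PySem.List.sorted2
  simp only [if_neg (by decide : ¬ (false = true))]
  have key : ∀ (l : List (String × String)) (acc : List (String × String)),
      acc.Pairwise (fun a b => a.1 ≤ b.1) →
      (l.foldl (fun acc x => PySem.List.insertBy
        (fun a b => decide (a.1 < b.1) || !decide (b.1 < a.1) && decide (a.2 < b.2)) x acc) acc).Pairwise
        (fun a b => a.1 ≤ b.1) := by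
    intro l
    induction l with
    | nil => intro acc h; simpa using h
    | cons x t ih =>
      intro acc h
      simp only [List.foldl_cons]
      refine ih _ ?_
      refine insertBy_pairwise _ (fun a b : String × String => a.1 ≤ b.1) ?_ ?_ (fun hab hbc => le_trans hab hbc) x acc h
      · intro a b hb
        rcases Bool.or_eq_true_iff.mp hb with hb | hb
        · exact le_of_lt (of_decide_eq_true hb)
        · exact le_of_not_gt (of_decide_eq_false (by simpa using (Bool.and_eq_true_iff.mp hb).1))
      · intro a b hb
        have : ¬ (a.1 < b.1) := by
          intro hlt
          simp [hlt] at hb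
        exact le_of_not_gt this
  exact key hosts [] (by simp)

-- membership in B's insertion
theorem mem_insertUnique (m n : String) : ∀ (l : List String),
    m ∈ insertUnique n l ↔ m = n ∨ m ∈ l := by
  intro l
  induction l with
  | nil => simp [insertUnique]
  | cons x t ih =>
    rcases lt_trichotomy n x with h | h | h
    · simp [insertUnique, h]
    · subst h
      simp only [insertUnique, if_neg (lt_irrefl n)]
      rw [if_pos trivial]
      simp only [List.mem_cons]
      tauto
    · have h1 : ¬ n < x := not_lt_of_gt h
      have h2 : n ≠ x := ne_of_gt h
      simp only [insertUnique, if_neg h1, if_neg h2, List.mem_cons, ih]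
      tauto

-- B's insertion keeps strict sortedness
theorem insertUnique_pairwise (n : String) : ∀ (l : List String),
    l.Pairwise (· < ·) → (insertUnique n l).Pairwise (· < ·) := by
  intro l
  induction l with
  | nil => intro _; simp [insertUnique]
  | cons x t ih =>
    intro hp
    rcases List.pairwise_cons.mp hp with ⟨hx, ht⟩
    by_cases h1 : n < x
    · simp only [insertUnique, if_pos h1]
      refine List.pairwise_cons.mpr ⟨?_, hp⟩
      intro m hm
      rcases List.mem_cons.mp hm with rfl | hm
      · exact h1
      · exact lt_trans h1 (hx m hm)
    · by_cases h2 : n = x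
      · simpa [insertUnique, h1, h2] using hp
      · have hxn : x < n := lt_of_le_of_ne (not_lt.mp h1) (fun he => h2 he.symm)
        simp only [insertUnique, if_neg h1, if_neg h2]
        refine List.pairwise_cons.mpr ⟨?_, ih ht⟩
        intro m hm
        rcases (mem_insertUnique m n t).mp hm with rfl | hm
        · exact hxn
        · exact hx m hm

-- B's fold: invariant (strictly sorted, members = acc ∪ names)
theorem foldB : ∀ (l : List (String × String)) (acc : List String),
    acc.Pairwise (· < ·) →
    (l.foldl (fun ordered p => insertUnique p.1 ordered) acc).Pairwise (· < ·) ∧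
    (∀ m, m ∈ l.foldl (fun ordered p => insertUnique p.1 ordered) acc ↔
      m ∈ acc ∨ m ∈ l.map Prod.fst) := by
  intro l
  induction l with
  | nil => intro acc h; exact ⟨h, by simp⟩
  | cons p t ih =>
    intro acc h
    have hacc' := insertUnique_pairwise p.1 acc h
    rcases ih (insertUnique p.1 acc) hacc' with ⟨h1, h2⟩
    refine ⟨h1, fun m => ?_⟩
    rw [List.foldl_cons] at *
    rw [h2, mem_insertUnique]
    simp
    tauto

-- two strictly increasing lists with the same members are equal
theorem eq_of_mem_iff_pairwise_lt : ∀ (l1 l2 : List String),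
    (∀ a, a ∈ l1 ↔ a ∈ l2) → l1.Pairwise (· < ·) → l2.Pairwise (· < ·) → l1 = l2 := by
  intro l1 l2 hm h1 h2
  have nd1 : l1.Nodup := h1.imp (fun h => ne_of_lt h)
  have nd2 : l2.Nodup := h2.imp (fun h => ne_of_lt h)
  exact List.Perm.eq_of_pairwise
    (fun a b _ _ hab hba => absurd hab (not_lt.mpr (le_of_lt hba))) h1 h2
    ((List.perm_ext_iff_of_nodup nd1 nd2).mpr hm)

-- ===== VERDICT (by name: the statement is the Claim_ definition above) =====
theorem build_species_list_py_spec : Claim_equal_build_species_list_py := by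
  intro hosts _
  unfold Spec_build_species_list_py build_species_list_py build_species_list_py_alt
  rw [show (PySem.Set.empty : PySem.Set String) = ([] : List String) from rfl,
    foldA (fun n => [("name", n)])]
  rcases foldB hosts [] (by simp) with ⟨hbp, hbm⟩
  have hperm : ((PySem.List.sorted2 hosts Prod.fst Prod.snd).map Prod.fst).Perm
      (hosts.map Prod.fst) :=
    List.Perm.map Prod.fst (PySem.List.sorted2_perm hosts Prod.fst Prod.snd false)
  have hkeq : pvKeep [] ((PySem.List.sorted2 hosts Prod.fst Prod.snd).map Prod.fst)
      = hosts.foldl (fun ordered p => insertUnique p.1 ordered) [] := by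
    refine eq_of_mem_iff_pairwise_lt _ _ (fun a => ?_) ?_ hbp
    · rw [mem_pvKeep, hbm]
      simp [hperm.mem_iff]
    · refine pvKeep_pairwise_lt _ ?_ []
      exact List.Pairwise.map _ (fun {a b} h => h) (sorted2_fst_pairwise hosts)
  simp [hkeq]
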